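-- pv_equiv track=rewrite | github.com/Sreejith2003/LeetCode | removeMin.py | removeMin
-- ===== SOURCE A (Python) =====
-- def removeMin(arr):
--     Max = max(arr)
--     Min = min(arr)
--     count = 0
--     arr.sort()
--     n = len(arr)
--     # while((2*Min) <= Max):
--     #     # arr.remove(Max)
--     #     # Max = max(arr)
--     #     # count += 1
--
--     #     arr.remove(Min)
--     #     Min = min(arr)
--     #     count += 1
--     # return count
--
--     for i in range(0, n):
--         if((2*Min) >= Max):
--             return count
--
--         else:
--             if Max >= 100:
--                 arr.remove(Max)
--                 n = len(arr)
--                 count += 1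
--                 Max = max(arr)
--
--             else:
--                 arr.remove(Min)
--                 Min = min(arr)
--                 n = len(arr)
--                 count += 1
--     return count
-- ===== SOURCE B (Python) =====
-- def removeMin(arr):
--     s = sorted(arr)
--     lo, hi = 0, len(s) - 1
--     count = 0
--     while lo <= hi:
--         if 2 * s[lo] >= s[hi]:
--             return count
--         if s[hi] >= 100:
--             hi -= 1
--         else:
--             lo += 1
--         count += 1
--     return count
-- ===== Notes on version B (the rewrite author's own statement) =====
-- stated objective: faster
-- what changed: A repeatedly calls max/min/remove on the mutated list (a linear scan per removal); B sorts a copy once and runs a two-pointer sweep over the sorted list, reading the current min/max in O(1) per step.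
import Mathlib
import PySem

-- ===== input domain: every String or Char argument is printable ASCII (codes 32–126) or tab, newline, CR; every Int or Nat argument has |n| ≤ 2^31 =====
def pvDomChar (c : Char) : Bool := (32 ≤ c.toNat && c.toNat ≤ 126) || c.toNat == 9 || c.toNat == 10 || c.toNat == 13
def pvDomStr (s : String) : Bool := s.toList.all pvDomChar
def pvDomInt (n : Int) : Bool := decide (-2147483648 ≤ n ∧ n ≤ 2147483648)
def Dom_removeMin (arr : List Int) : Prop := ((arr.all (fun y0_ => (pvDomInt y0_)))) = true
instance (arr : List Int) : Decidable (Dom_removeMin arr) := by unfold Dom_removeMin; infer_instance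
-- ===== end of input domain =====

-- B replaces A's repeated remove/max/min passes by one sort plus a two-pointer sweep.
-- Note: Python A mutates its argument (sorts it and removes elements); B does not — the
-- equivalence proved here is about the RETURN value only.

-- ===== PORT A =====
-- A's for-loop over range(0, n): exactly n iterations, early return, state (arr, Max, Min, count).
-- Python's max()/min() on an emptied list raise ValueError; the PySem primitives return none there
-- and the port falls back to `count` — exactly those inputs are excluded by Pre_removeMin.
def removeMinLoop : Nat → List Int → Int → Int → Int → Int
  | 0, _, _, _, count => count
  | fuel + 1, arr, mx, mn, count =>
    if 2 * mn ≥ mx then count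
    else
      if mx ≥ 100 then
        match PySem.List.remove? arr mx with
        | none => count                       -- unreachable: mx ∈ arr
        | some arr' =>
          match PySem.List.max? arr' (fun y => y) with
          | none => count                     -- Python raises ValueError here (outside Pre_)
          | some mx' => removeMinLoop fuel arr' mx' mn (count + 1)
      else
        match PySem.List.remove? arr mn with
        | none => count                       -- unreachable: mn ∈ arr
        | some arr' =>
          match PySem.List.min? arr' (fun y => y) with
          | none => count                     -- Python raises ValueError here (outside Pre_)
          | some mn' => removeMinLoop fuel arr' mx mn' (count + 1)

def removeMin (arr : List Int) : Int :=
  match PySem.List.max? arr (fun y => y), PySem.List.min? arr (fun y => y) with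
  | some mx, some mn =>
      removeMinLoop arr.length (PySem.List.sorted arr (fun y => y) false) mx mn 0
  | _, _ => 0                                 -- arr = []: Python raises ValueError (outside Pre_)

-- ===== PORT B =====
-- B's while-loop: two pointers lo, hi (Python ints) into the sorted copy; the loop runs at most
-- s.length + 1 times (hi - lo shrinks every iteration), so that fuel is sufficient.
-- Indices are read via pyGetD with default 0: the loop only ever reads in-range indices.
def removeMinAltLoop : Nat → List Int → Int → Int → Int → Int
  | 0, _, _, _, count => count
  | fuel + 1, s, lo, hi, count =>
    if lo ≤ hi then
      let a := PySem.List.pyGetD s lo 0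
      let b := PySem.List.pyGetD s hi 0
      if 2 * a ≥ b then count
      else if b ≥ 100 then removeMinAltLoop fuel s lo (hi - 1) (count + 1)
      else removeMinAltLoop fuel s (lo + 1) hi (count + 1)
    else count

def removeMin_alt (arr : List Int) : Int :=
  let s := PySem.List.sorted arr (fun y => y) false
  removeMinAltLoop (s.length + 1) s 0 ((s.length : Int) - 1) 0

-- ===== PRECONDITION & SPEC =====
-- Pre_ excludes exactly the inputs on which Python A raises ValueError (max()/min() of an empty
-- sequence): the empty list, and lists whose every element is negative or ≥ 100 with at least one
-- negative element — there A's removal loop empties the list.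
def Pre_removeMin (arr : List Int) : Prop :=
  arr ≠ [] ∧ ((∃ x ∈ arr, 0 ≤ x ∧ x < 100) ∨ ∀ x ∈ arr, 0 ≤ x)
instance (arr : List Int) : Decidable (Pre_removeMin arr) := by unfold Pre_removeMin; infer_instance
def pvWitness_removeMin : List Int := [1, 5]

def Spec_removeMin (arr : List Int) (out : Int) : Prop := out = removeMin_alt arr
instance (arr : List Int) (out : Int) : Decidable (Spec_removeMin arr out) := by unfold Spec_removeMin; infer_instance

-- ===== CLAIM (what is proved, stated in full; the proofs are below) =====
def Claim_equal_removeMin : Prop := ∀ (arr : List Int), Dom_removeMin arr → Pre_removeMin arr → Spec_removeMin arr (removeMin arr)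

-- ===== LEMMAS AND PROOFS =====

-- the window of the sorted list that A's mutable list equals: s[lo..hi] inclusive
def pvWindow (s : List Int) (lo hi : Nat) : List Int := (s.drop lo).take (hi + 1 - lo)

theorem pvWindow_length (s : List Int) (lo hi : Nat) (h2 : hi < s.length) :
    (pvWindow s lo hi).length = hi + 1 - lo := by
  simp [pvWindow]; omega

theorem pvWindow_getElem (s : List Int) (lo hi k : Nat) (h2 : hi < s.length)
    (hk : k < hi + 1 - lo) :
    (pvWindow s lo hi)[k]'(by rw [pvWindow_length s lo hi h2]; omega) = s[lo + k]'(by omega) := by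
  simp [pvWindow]

theorem pvWindow_pairwise (s : List Int) (hs : s.Pairwise (· ≤ ·)) (lo hi : Nat) :
    (pvWindow s lo hi).Pairwise (· ≤ ·) :=
  hs.sublist ((List.take_sublist _ _).trans (List.drop_sublist _ _))

theorem pvWindow_cons (s : List Int) (lo hi : Nat) (h1 : lo ≤ hi) (h2 : hi < s.length) :
    pvWindow s lo hi = s[lo]'(by omega) :: pvWindow s (lo + 1) hi := by
  apply List.ext_getElem
  · rw [pvWindow_length s lo hi h2]
    simp [pvWindow_length s (lo + 1) hi h2]
    omega
  · intro i hL hR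
    rw [pvWindow_length s lo hi h2] at hL
    cases i with
    | zero =>
        rw [List.getElem_cons_zero]
        have := pvWindow_getElem s lo hi 0 h2 (by omega)
        simpa using this
    | succ k =>
        rw [List.getElem_cons_succ]
        rw [pvWindow_getElem s lo hi (k + 1) h2 (by omega),
            pvWindow_getElem s (lo + 1) hi k h2 (by omega)]
        simp only [show lo + (k + 1) = lo + 1 + k from by omega]

theorem pvWindow_getLast (s : List Int) (lo hi : Nat) (h1 : lo ≤ hi) (h2 : hi < s.length)
    (hne : pvWindow s lo hi ≠ []) :
    (pvWindow s lo hi).getLast hne = s[hi]'h2 := by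
  rw [List.getLast_eq_getElem]
  simp only [pvWindow_length s lo hi h2]
  rw [pvWindow_getElem s lo hi (hi + 1 - lo - 1) h2 (by omega)]
  simp only [show lo + (hi + 1 - lo - 1) = hi from by omega]

theorem pvWindow_dropLast (s : List Int) (lo hi : Nat) (h1 : lo < hi) (h2 : hi < s.length) :
    (pvWindow s lo hi).dropLast = pvWindow s lo (hi - 1) := by
  apply List.ext_getElem
  · rw [List.length_dropLast, pvWindow_length s lo hi h2,
      pvWindow_length s lo (hi - 1) (by omega)]
    omega
  · intro i hL hR
    rw [List.length_dropLast, pvWindow_length s lo hi h2] at hL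
    rw [List.getElem_dropLast]
    rw [pvWindow_getElem s lo hi i h2 (by omega),
        pvWindow_getElem s lo (hi - 1) i (by omega) (by
          rw [pvWindow_length s lo (hi - 1) (by omega)] at hR; omega)]

theorem sorted_foldl_min (x : Int) (t : List Int) (h : ∀ y ∈ t, x ≤ y) :
    t.foldl min x = x := by
  induction t generalizing x with
  | nil => rfl
  | cons y t ih =>
      have hxy : x ≤ y := h y (by simp)
      simp only [List.foldl_cons, min_eq_left hxy]
      exact ih x (fun z hz => h z (by simp [hz]))

theorem sorted_min?_eq (x : Int) (t : List Int) (h : (x :: t).Pairwise (· ≤ ·)) :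
    PySem.List.min? (x :: t) (fun y => y) = some x := by
  rw [PySem.List.min?_id_cons, sorted_foldl_min x t (by
    intro y hy; exact (List.pairwise_cons.mp h).1 y hy)]

theorem sorted_min?_head (t : List Int) (h : t.Pairwise (· ≤ ·)) (hne : t ≠ []) :
    PySem.List.min? t (fun y => y) = some (t[0]'(List.length_pos_iff.mpr hne)) := by
  obtain ⟨x, t', rfl⟩ := List.exists_cons_of_ne_nil hne
  rw [sorted_min?_eq x t' h]
  simp

theorem sorted_all_le_getLast (t : List Int) (h : t.Pairwise (· ≤ ·)) (hne : t ≠ []) :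
    ∀ z ∈ t, z ≤ t.getLast hne := by
  intro z hz
  induction t with
  | nil => simp at hz
  | cons x t ih =>
      rcases List.pairwise_cons.mp h with ⟨hx, ht⟩
      cases t with
      | nil => simp at hz; simp [hz]
      | cons y t' =>
          rw [List.getLast_cons (by simp)]
          rcases hz with _ | hz
          · exact le_trans (hx _ (List.getLast_mem _)) (le_refl _)
          · exact ih ht (by simp) (by assumption)

theorem sorted_max?_eq (t : List Int) (h : t.Pairwise (· ≤ ·)) (hne : t ≠ []) :
    PySem.List.max? t (fun y => y) = some (t.getLast hne) := by
  cases hm : PySem.List.max? t (fun y => y) with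
  | none => exact absurd ((PySem.List.max?_eq_none_iff _ _).mp hm) hne
  | some m =>
      congr 1
      have h1 : m ≤ t.getLast hne :=
        sorted_all_le_getLast t h hne m (PySem.List.max?_mem hm)
      have h2 : t.getLast hne ≤ m := PySem.List.max?_isMax hm _ (List.getLast_mem hne)
      omega

theorem all_eq_tail_eq_dropLast (x : Int) (t : List Int) (h : ∀ z ∈ t, z = x) :
    t = (x :: t).dropLast := by
  induction t with
  | nil => rfl
  | cons y t ih =>
      have hy : y = x := h y (by simp)
      cases t with
      | nil => simp [hy]
      | cons z t' =>
          have := ih (fun w hw => h w (by simp at hw ⊢; tauto))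
          simp only [List.dropLast_cons₂] at this ⊢
          rw [hy]
          exact congrArg (List.cons x) this

theorem sorted_remove_getLast (t : List Int) (h : t.Pairwise (· ≤ ·)) (hne : t ≠ []) :
    PySem.List.remove? t (t.getLast hne) = some t.dropLast := by
  induction t with
  | nil => exact absurd rfl hne
  | cons x t ih =>
      by_cases hx : x = (x :: t).getLast hne
      · -- head already equals the last element: all elements equal, tail = dropLast
        conv_lhs => rw [← hx]
        rw [PySem.List.remove?_cons_self]
        congr 1
        exact all_eq_tail_eq_dropLast x t (fun z hz => le_antisymm
          (hx ▸ sorted_all_le_getLast (x :: t) h hne z (by simp [hz]))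
          ((List.pairwise_cons.mp h).1 z hz))
      · cases t with
        | nil => simp at hx
        | cons y t' =>
            have hlast : (x :: y :: t').getLast hne = (y :: t').getLast (by simp) :=
              List.getLast_cons (by simp)
            rw [PySem.List.remove?_cons_of_ne _ hx, hlast,
              ih (List.pairwise_cons.mp h).2 (by simp)]
            simp [List.dropLast_cons₂]

-- the loop bisimulation: A's loop on the window s[lo..hi] equals B's two-pointer loop,
-- provided the window cannot be emptied (Pre_ restricted to the window)
theorem loop_eq (s : List Int) (hs : s.Pairwise (· ≤ ·)) :
    ∀ (f g : Nat) (lo hi : Nat) (count : Int), lo ≤ hi → hi < s.length →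
    hi + 1 - lo ≤ f → hi + 1 - lo ≤ g →
    ((∃ j : Nat, lo ≤ j ∧ j ≤ hi ∧ ∃ hj : j < s.length, 0 ≤ s[j] ∧ s[j] < 100) ∨
      (∀ j : Nat, lo ≤ j → j ≤ hi → ∀ hj : j < s.length, 0 ≤ s[j])) →
    removeMinLoop f (pvWindow s lo hi) (s.getD hi 0) (s.getD lo 0) count
      = removeMinAltLoop g s (lo : Int) (hi : Int) count := by
  intro f
  induction f with
  | zero =>
      intro g lo hi count h1 h2 hf hg H
      exact absurd hf (by clear H; omega)
  | succ f ih =>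
      intro g lo hi count h1 h2 hf hg H
      obtain ⟨g', rfl⟩ : ∃ g', g = g' + 1 := ⟨g - 1, by clear H; omega⟩
      have hlo : lo < s.length := by clear H; omega
      have ha : s.getD lo 0 = s[lo] := List.getD_eq_getElem s 0 hlo
      have hb : s.getD hi 0 = s[hi] := List.getD_eq_getElem s 0 h2
      have hab : s[lo] ≤ s[hi] := by
        rcases Nat.lt_or_ge lo hi with hlt | hge
        · exact List.pairwise_iff_getElem.mp hs lo hi hlo h2 hlt
        · have : lo = hi := by clear H; omega
          subst this; exact le_refl _
      have hcast : ((lo : Int) ≤ (hi : Int)) := by exact_mod_cast h1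
      simp only [removeMinLoop, removeMinAltLoop, PySem.List.pyGetD_natCast, ha, hb]
      rw [if_pos hcast]
      by_cases hret : 2 * s[lo] ≥ s[hi]
      · simp only [if_pos hret]
      · simp only [if_neg hret]
        by_cases hbig : s[hi] ≥ 100
        · -- max branch: A removes the last element of the window; B moves hi down
          have hlt : lo < hi := by
            rcases Nat.lt_or_ge lo hi with h | h
            · exact h
            · exfalso; have : lo = hi := by clear H; omega
              subst this; clear H; omega
          have hwne : pvWindow s lo hi ≠ [] := by
            intro hnil
            have := pvWindow_length s lo hi h2
            rw [hnil] at this; simp at this; clear H; omega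
          have hwp := pvWindow_pairwise s hs lo hi
          have hrm : PySem.List.remove? (pvWindow s lo hi) s[hi] = some (pvWindow s lo (hi - 1)) := by
            have := sorted_remove_getLast (pvWindow s lo hi) hwp hwne
            rw [pvWindow_getLast s lo hi h1 h2 hwne] at this
            rw [this, pvWindow_dropLast s lo hi hlt h2]
          have hwne' : pvWindow s lo (hi - 1) ≠ [] := by
            intro hnil
            have := pvWindow_length s lo (hi - 1) (by clear H; omega)
            rw [hnil] at this; simp at this; clear H; omega
          have hmx : PySem.List.max? (pvWindow s lo (hi - 1)) (fun y => y)
              = some (s[hi - 1]'(by clear H; omega)) := by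
            rw [sorted_max?_eq (pvWindow s lo (hi - 1)) (pvWindow_pairwise s hs lo (hi - 1)) hwne',
              pvWindow_getLast s lo (hi - 1) (by clear H; omega) (by clear H; omega) hwne']
          simp only [if_pos hbig, hrm, hmx]
          have hrec := ih g' lo (hi - 1) (count + 1) (by clear H; omega) (by clear H; omega)
            (by clear H; omega) (by clear H; omega)
            (by
              rcases H with ⟨j, hj1, hj2, hjl, hj0, hj100⟩ | Hall
              · left
                have hjne : j ≠ hi := by
                  intro he; subst he; omega
                exact ⟨j, hj1, by omega, hjl, hj0, hj100⟩
              · right; intro j hj1 hj2 hjl; exact Hall j hj1 (by omega) hjl)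
          rw [List.getD_eq_getElem s 0 (show hi - 1 < s.length by clear H; omega),
            List.getD_eq_getElem s 0 hlo] at hrec
          rw [hrec]
          have : ((hi : Int) - 1) = ((hi - 1 : Nat) : Int) := by clear H; omega
          rw [this]
        · -- min branch: A removes the head of the window; B moves lo up
          have hlt : lo < hi := by
            rcases Nat.lt_or_ge lo hi with h | h
            · exact h
            · exfalso
              have hlohi : lo = hi := by clear H; omega
              subst hlohi
              rcases H with ⟨j, hj1, hj2, hjl, hj0, hj100⟩ | Hall
              · have hjlo : j = lo := by omega
                subst hjlo; omega
              · have := Hall lo (le_refl _) (le_refl _) hlo; omega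
          have hcons := pvWindow_cons s lo hi h1 h2
          have hrm : PySem.List.remove? (pvWindow s lo hi) s[lo] = some (pvWindow s (lo + 1) hi) := by
            rw [hcons, PySem.List.remove?_cons_self]
          have hmn : PySem.List.min? (pvWindow s (lo + 1) hi) (fun y => y)
              = some (s[lo + 1]'(by clear H; omega)) := by
            rw [pvWindow_cons s (lo + 1) hi (by clear H; omega) h2]
            exact sorted_min?_eq _ _ (by
              rw [← pvWindow_cons s (lo + 1) hi (by clear H; omega) h2]
              exact pvWindow_pairwise s hs (lo + 1) hi)
          simp only [if_neg hbig, hrm, hmn]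
          have hrec := ih g' (lo + 1) hi (count + 1) (by clear H; omega) h2
            (by clear H; omega) (by clear H; omega)
            (by
              rcases H with ⟨j, hj1, hj2, hjl, hj0, hj100⟩ | Hall
              · rcases Nat.lt_or_ge lo j with h | h
                · exact Or.inl ⟨j, by omega, hj2, hjl, hj0, hj100⟩
                · -- j = lo: then s[hi] itself lies in [0, 100)
                  have hjlo : j = lo := by omega
                  subst hjlo
                  exact Or.inl ⟨hi, by omega, le_refl _, h2, by omega, by omega⟩
              · right; intro j hj1 hj2 hjl; exact Hall j (by omega) hj2 hjl)
          rw [List.getD_eq_getElem s 0 (show lo + 1 < s.length by clear H; omega),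
            List.getD_eq_getElem s 0 h2] at hrec
          rw [hrec]
          have : ((lo : Int) + 1) = ((lo + 1 : Nat) : Int) := by omega
          rw [this]

theorem max?_perm_sorted (arr : List Int) (hne : arr ≠ []) :
    PySem.List.max? arr (fun y => y)
      = PySem.List.max? (PySem.List.sorted arr (fun y => y) false) (fun y => y) := by
  have hne' : PySem.List.sorted arr (fun y => y) false ≠ [] := by
    intro h; exact hne ((PySem.List.sorted_eq_nil_iff _ _ _).mp h)
  cases h1 : PySem.List.max? arr (fun y => y) with
  | none => exact absurd ((PySem.List.max?_eq_none_iff _ _).mp h1) hne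
  | some m1 =>
      cases h2 : PySem.List.max? (PySem.List.sorted arr (fun y => y) false) (fun y => y) with
      | none => exact absurd ((PySem.List.max?_eq_none_iff _ _).mp h2) hne'
      | some m2 =>
          congr 1
          have hm1 : m1 ∈ arr := PySem.List.max?_mem h1
          have hm2 : m2 ∈ arr := (PySem.List.mem_sorted _ _ _ _).mp (PySem.List.max?_mem h2)
          have l1 : m2 ≤ m1 := PySem.List.max?_isMax h1 _ hm2
          have l2 : m1 ≤ m2 := PySem.List.max?_isMax h2 _ ((PySem.List.mem_sorted _ _ _ _).mpr hm1)
          omega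

theorem min?_perm_sorted (arr : List Int) (hne : arr ≠ []) :
    PySem.List.min? arr (fun y => y)
      = PySem.List.min? (PySem.List.sorted arr (fun y => y) false) (fun y => y) := by
  have hne' : PySem.List.sorted arr (fun y => y) false ≠ [] := by
    intro h; exact hne ((PySem.List.sorted_eq_nil_iff _ _ _).mp h)
  cases h1 : PySem.List.min? arr (fun y => y) with
  | none => exact absurd ((PySem.List.min?_eq_none_iff _ _).mp h1) hne
  | some m1 =>
      cases h2 : PySem.List.min? (PySem.List.sorted arr (fun y => y) false) (fun y => y) with
      | none => exact absurd ((PySem.List.min?_eq_none_iff _ _).mp h2) hne'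
      | some m2 =>
          congr 1
          have hm1 : m1 ∈ arr := PySem.List.min?_mem h1
          have hm2 : m2 ∈ arr := (PySem.List.mem_sorted _ _ _ _).mp (PySem.List.min?_mem h2)
          have l1 : m1 ≤ m2 := PySem.List.min?_isMin h1 _ hm2
          have l2 : m2 ≤ m1 := PySem.List.min?_isMin h2 _ ((PySem.List.mem_sorted _ _ _ _).mpr hm1)
          omega

-- ===== VERDICT (by name: the statements are the Claim_ definitions above) =====
theorem removeMin_spec : Claim_equal_removeMin := by
  intro arr _ hpre
  rcases hpre with ⟨hne, hP⟩
  unfold Spec_removeMin removeMin removeMin_alt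
  have hs : (PySem.List.sorted arr (fun y => y) false).Pairwise (· ≤ ·) :=
    PySem.List.sorted_pairwise arr (fun y => y)
  set s := PySem.List.sorted arr (fun y => y) false with hsdef
  have hsl : s.length = arr.length := PySem.List.length_sorted _ _ _
  have hne' : s ≠ [] := by
    intro h; exact hne ((PySem.List.sorted_eq_nil_iff _ _ _).mp h)
  have hn : 1 ≤ s.length := List.length_pos_iff.mpr hne'
  have hmx : PySem.List.max? arr (fun y => y)
      = some (s[s.length - 1]'(by omega)) := by
    rw [max?_perm_sorted arr hne, ← hsdef, sorted_max?_eq s hs hne',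
      List.getLast_eq_getElem]
  have hmn : PySem.List.min? arr (fun y => y) = some (s[0]'(by omega)) := by
    rw [min?_perm_sorted arr hne, ← hsdef, sorted_min?_head s hs hne']
  rw [hmx, hmn]
  have hwin : pvWindow s 0 (s.length - 1) = s := by
    simp [pvWindow]
    omega
  have H : (∃ j : Nat, 0 ≤ j ∧ j ≤ s.length - 1 ∧ ∃ hj : j < s.length, 0 ≤ s[j] ∧ s[j] < 100) ∨
      (∀ j : Nat, 0 ≤ j → j ≤ s.length - 1 → ∀ hj : j < s.length, 0 ≤ s[j]) := by
    rcases hP with ⟨x, hx, hx0, hx100⟩ | hall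
    · have : x ∈ s := (PySem.List.mem_sorted _ _ _ _).mpr hx
      obtain ⟨j, hj, hjx⟩ := List.mem_iff_getElem.mp this
      exact Or.inl ⟨j, by omega, by omega, hj, by omega, by omega⟩
    · right; intro j _ _ hj
      exact hall s[j] ((PySem.List.mem_sorted _ _ _ _).mp (List.getElem_mem hj))
  have := loop_eq s hs arr.length (s.length + 1) 0 (s.length - 1) 0
    (by omega) (by omega) (by omega) (by omega) H
  rw [hwin, List.getD_eq_getElem s 0 (by omega), List.getD_eq_getElem s 0 (by omega)] at this
  have e1 : (((0 : Nat)) : Int) = 0 := by simp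
  have e2 : (((s.length - 1 : Nat)) : Int) = (s.length : Int) - 1 := by omega
  rw [e1, e2] at this
  exact this
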